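-- pv_equiv track=rewrite | github.com/mathisfun271/RSA | decryptOnly.py | numToTxt
-- ===== SOURCE A (Python) =====
-- char = {'00': ' ', '0100': 'e', '0101': 't', '0110': 'a', '0111': 'r', '1000': 'i', '1001': 'o', '1010': 'n', '10110': 's', '10111': 'h', '11000': 'd', '11001': 'l', '11010': 'u', '110110': 'w', '110111': 'm', '111000': 'f', '111001': 'c', '111010': 'g', '111011': 'y', '111100': 'p', '111101': '.', '1111100': 'b', '1111101': 'k', '11111100': 'v', '11111101': 'j', '11111110': 'x', '111111110': 'q', '111111111': 'z'}
--
-- def numToTxt(bi):#converts raw binary string to plaintext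
--     pos = 0
--     ret = ''
--     for x in range(0,len(bi)+1):
--         try:#attemts to add charater from library.
--             ret += char[bi[pos:x]]
--             pos = x#resets index
--         except:1#moves on if none found
--     ret2 = ''
--     k = 1
--     for rChar in ret:#Capitalizes first string and character 2nd after period
--         if k==1:
--             ret2+=rChar.upper()
--         else:
--             ret2+=rChar
--         if rChar=='.':
--             k=2
--         elif k>0:
--             k-=1
--     return ret2
-- ===== SOURCE B (Python) =====
-- char = {'00': ' ', '0100': 'e', '0101': 't', '0110': 'a', '0111': 'r', '1000': 'i', '1001': 'o', '1010': 'n', '10110': 's', '10111': 'h', '11000': 'd', '11001': 'l', '11010': 'u', '110110': 'w', '110111': 'm', '111000': 'f', '111001': 'c', '111010': 'g', '111011': 'y', '111100': 'p', '111101': '.', '1111100': 'b', '1111101': 'k', '11111100': 'v', '11111101': 'j', '11111110': 'x', '111111110': 'q', '111111111': 'z'}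
--
-- _END = '$'
--
-- def _build_trie():
--     root = {}
--     for code, c in char.items():
--         node = root
--         for b in code:
--             node = node.setdefault(b, {})
--         node[_END] = c
--     return root
--
-- _ROOT = _build_trie()
--
-- def numToTxt(bi):  # converts raw binary string to plaintext
--     # decode: walk the trie bit by bit, emit at terminal nodes, reset to the root
--     node = _ROOT
--     out = []
--     for b in bi:
--         node = node.get(b) if node is not None else None
--         if node is not None and _END in node:
--             out.append(node[_END])
--             node = _ROOT
--     # capitalize: a character is uppercased iff it is the first, or the char two
--     # back was '.' and the previous one was not (sliding window of the last two chars)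
--     res = []
--     p2 = p1 = None
--     for c in out:
--         res.append(c.upper() if p1 is None or (p2 == '.' and p1 != '.') else c)
--         p2, p1 = p1, c
--     return ''.join(res)
-- ===== Notes on version B (the rewrite author's own statement) =====
-- stated objective: faster
-- what changed: Replaces A's pass over all slice endpoints (a growing substring sliced out and looked up in the code dict at every index) by a single walk over a binary trie built once from the code table (node pointer, emit at terminal nodes, reset to root), and replaces the capitalization counter loop by a sliding window over the last two emitted characters.
import Mathlib
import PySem

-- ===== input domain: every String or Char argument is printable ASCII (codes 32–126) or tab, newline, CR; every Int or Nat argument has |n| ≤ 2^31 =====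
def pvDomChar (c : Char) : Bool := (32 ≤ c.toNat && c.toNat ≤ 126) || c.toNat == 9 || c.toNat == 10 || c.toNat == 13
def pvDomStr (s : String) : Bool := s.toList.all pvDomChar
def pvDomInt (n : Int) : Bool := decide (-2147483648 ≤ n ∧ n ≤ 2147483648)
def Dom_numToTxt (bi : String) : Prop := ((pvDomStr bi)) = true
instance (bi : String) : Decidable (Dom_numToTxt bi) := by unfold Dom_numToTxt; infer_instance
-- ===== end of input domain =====

-- B replaces A's greedy decode by repeated dict lookups of ever-growing slices with a single
-- left-to-right walk over a binary trie built once from the same code table, and replaces the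
-- capitalization counter loop with a sliding window over the last two chars (objective: faster).

-- ===== PORT A =====
-- the module constant `char`, a dict keyed by the binary code strings (as char lists)
def pvCodes : List (List Char × Char) :=
  [(['0','0'], ' '), (['0','1','0','0'], 'e'), (['0','1','0','1'], 't'),
   (['0','1','1','0'], 'a'), (['0','1','1','1'], 'r'), (['1','0','0','0'], 'i'),
   (['1','0','0','1'], 'o'), (['1','0','1','0'], 'n'), (['1','0','1','1','0'], 's'),
   (['1','0','1','1','1'], 'h'), (['1','1','0','0','0'], 'd'), (['1','1','0','0','1'], 'l'),
   (['1','1','0','1','0'], 'u'), (['1','1','0','1','1','0'], 'w'), (['1','1','0','1','1','1'], 'm'),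
   (['1','1','1','0','0','0'], 'f'), (['1','1','1','0','0','1'], 'c'), (['1','1','1','0','1','0'], 'g'),
   (['1','1','1','0','1','1'], 'y'), (['1','1','1','1','0','0'], 'p'), (['1','1','1','1','0','1'], '.'),
   (['1','1','1','1','1','0','0'], 'b'), (['1','1','1','1','1','0','1'], 'k'),
   (['1','1','1','1','1','1','0','0'], 'v'), (['1','1','1','1','1','1','0','1'], 'j'),
   (['1','1','1','1','1','1','1','0'], 'x'), (['1','1','1','1','1','1','1','1','0'], 'q'),
   (['1','1','1','1','1','1','1','1','1'], 'z')]

def pvCharDict : PySem.Dict (List Char) Char := PySem.Dict.ofList pvCodes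

def numToTxt (bi : String) : String :=
  let l := bi.toList
  -- first loop: ret += char[bi[pos:x]] when the slice is a key, pos = x; else move on
  let st := (PySem.List.pyRange 0 ((l.length : Int) + 1) 1).foldl
    (fun (st : Int × List Char) x =>
      match (pvCharDict.get? (PySem.List.slice l (some st.1) (some x))) with
      | some c => (x, st.2 ++ [c])
      | none => st)
    (0, [])
  -- second loop: capitalize when k == 1; k := 2 after '.', else decrement while k > 0
  let cap := (st.2.foldl
    (fun (st : List Char × Int) rChar =>
      (st.1 ++ [if st.2 = 1 then PySem.Chars.upperChar rChar else rChar],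
       if rChar = '.' then 2 else if st.2 > 0 then st.2 - 1 else st.2))
    ([], 1)).1
  String.ofList cap

-- ===== PORT B =====
-- binary trie: Python B's nested dicts keyed by '0'/'1' with a sentinel value; nil = absent node / dead state
inductive PvTrie : Type
  | nil : PvTrie
  | node : Option Char → PvTrie → PvTrie → PvTrie
deriving DecidableEq, Repr

def PvTrie.val : PvTrie → Option Char
  | .nil => none
  | .node v _ _ => v

def PvTrie.left : PvTrie → PvTrie
  | .nil => .nil
  | .node _ l _ => l

def PvTrie.right : PvTrie → PvTrie
  | .nil => .nil
  | .node _ _ r => r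

-- node = node.setdefault(b, {}) descent, then node[END] = c
def PvTrie.insert : PvTrie → List Char → Char → PvTrie
  | t, [], ch => .node (some ch) t.left t.right
  | t, c :: cs, ch =>
      if c = '0' then .node t.val (t.left.insert cs ch) t.right
      else .node t.val t.left (t.right.insert cs ch)

-- node = node.get(b): None for an absent child or a non-'0'/'1' char; a dead state stays dead
def PvTrie.step : PvTrie → Char → PvTrie
  | .nil, _ => .nil
  | .node _ l r, c => if c = '0' then l else if c = '1' then r else .nil

-- the same code table as B's module constant `char` sees it: code strings
def pvCodesB : List (String × Char) :=
  [("00", ' '), ("0100", 'e'), ("0101", 't'), ("0110", 'a'), ("0111", 'r'),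
   ("1000", 'i'), ("1001", 'o'), ("1010", 'n'), ("10110", 's'), ("10111", 'h'),
   ("11000", 'd'), ("11001", 'l'), ("11010", 'u'), ("110110", 'w'), ("110111", 'm'),
   ("111000", 'f'), ("111001", 'c'), ("111010", 'g'), ("111011", 'y'), ("111100", 'p'),
   ("111101", '.'), ("1111100", 'b'), ("1111101", 'k'), ("11111100", 'v'),
   ("11111101", 'j'), ("11111110", 'x'), ("111111110", 'q'), ("111111111", 'z')]

def pvRoot : PvTrie := pvCodesB.foldl (fun t p => t.insert p.1.toList p.2) .nil

-- decode loop: step by one bit; on a terminal node emit its char and reset to the root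
def pvDecode : PvTrie → List Char → List Char
  | _, [] => []
  | nd, b :: rest =>
      let nd' := nd.step b
      match nd'.val with
      | some c => c :: pvDecode pvRoot rest
      | none => pvDecode nd' rest

-- capitalization by sliding window: uppercase the first char and any char whose
-- char-two-back is '.' and whose previous char is not
def pvCapB : Option Char → Option Char → List Char → List Char
  | _, _, [] => []
  | p2, p1, c :: cs =>
      (if p1 = none ∨ (p2 = some '.' ∧ p1 ≠ some '.') then PySem.Chars.upperChar c else c)
        :: pvCapB p1 (some c) cs

def numToTxt_alt (bi : String) : String :=
  String.ofList (pvCapB none none (pvDecode pvRoot bi.toList))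

-- ===== PRECONDITION & SPEC =====
def Spec_numToTxt (bi : String) (out : String) : Prop := out = numToTxt_alt bi
instance (bi : String) (out : String) : Decidable (Spec_numToTxt bi out) := by unfold Spec_numToTxt; infer_instance

-- ===== CLAIM (what is proved, stated in full; the proofs are below) =====
def Claim_equal_numToTxt : Prop := ∀ (bi : String), Dom_numToTxt bi → Spec_numToTxt bi (numToTxt bi)

-- ===== LEMMAS AND PROOFS =====

-- ---- the trie lookup agrees with the dict lookup ----

def pvWalk (t : PvTrie) (s : List Char) : PvTrie := s.foldl PvTrie.step t

theorem pvWalk_nil (s : List Char) : pvWalk .nil s = .nil := by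
  induction s with
  | nil => rfl
  | cons c cs ih => simpa [pvWalk, PvTrie.step] using ih

theorem pvWalk_insert (code : List Char) (h : ∀ c ∈ code, c = '0' ∨ c = '1')
    (t : PvTrie) (ch : Char) (s : List Char) :
    (pvWalk (t.insert code ch) s).val = if s = code then some ch else (pvWalk t s).val := by
  induction code generalizing t s with
  | nil =>
      cases s with
      | nil => simp [pvWalk, PvTrie.insert, PvTrie.val]
      | cons d ds =>
          simp only [pvWalk, List.foldl_cons, PvTrie.insert, PvTrie.step]
          cases t with
          | nil =>
              simp [PvTrie.left, PvTrie.right]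
          | node v l r => simp [PvTrie.left, PvTrie.right]
  | cons c cs ih =>
      have hc : c = '0' ∨ c = '1' := h c (by simp)
      have hcs : ∀ x ∈ cs, x = '0' ∨ x = '1' := fun x hx => h x (by simp [hx])
      cases s with
      | nil =>
          cases t <;>
            rcases hc with hc | hc <;>
              subst hc <;> simp [pvWalk, PvTrie.insert, PvTrie.val, PvTrie.left, PvTrie.right]
      | cons d ds =>
          simp only [pvWalk, List.foldl_cons]
          rcases hc with hc | hc <;> subst hc
          · -- c = '0'
            simp only [PvTrie.insert]
            by_cases hd : d = '0'
            · subst hd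
              cases t with
              | nil => simpa [PvTrie.step, PvTrie.left, pvWalk] using ih hcs .nil ds
              | node v l r => simpa [PvTrie.step, PvTrie.left, pvWalk] using ih hcs l ds
            · cases t with
              | nil =>
                  by_cases hd1 : d = '1' <;>
                    simp [PvTrie.step, PvTrie.right, hd, hd1, PvTrie.val]
              | node v l r =>
                  by_cases hd1 : d = '1' <;>
                    simp [PvTrie.step, PvTrie.right, hd, hd1, PvTrie.val]
          · -- c = '1'
            simp only [PvTrie.insert]
            have : ('1' : Char) ≠ '0' := by decide
            simp only [if_neg this]
            by_cases hd : d = '1'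
            · subst hd
              cases t with
              | nil => simpa [PvTrie.step, PvTrie.right, pvWalk] using ih hcs .nil ds
              | node v l r => simpa [PvTrie.step, PvTrie.right, pvWalk] using ih hcs r ds
            · cases t with
              | nil =>
                  by_cases hd0 : d = '0' <;>
                    simp [PvTrie.step, PvTrie.left, hd, hd0, PvTrie.val]
              | node v l r =>
                  by_cases hd0 : d = '0' <;>
                    simp [PvTrie.step, PvTrie.left, hd, hd0, PvTrie.val]

theorem pvRoot_eq : pvRoot = pvCodes.foldl (fun t p => t.insert p.1 p.2) .nil := by decide

set_option maxRecDepth 10000 in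
theorem pvLookup_eq_walk (s : List Char) :
    (PySem.Dict.mk pvCodes).get? s = (pvWalk pvRoot s).val := by
  have hroot : (pvWalk pvRoot s).val =
      (if s = ['1','1','1','1','1','1','1','1','1'] then some 'z' else (if s = ['1','1','1','1','1','1','1','1','0'] then some 'q' else (if s = ['1','1','1','1','1','1','1','0'] then some 'x' else (if s = ['1','1','1','1','1','1','0','1'] then some 'j' else (if s = ['1','1','1','1','1','1','0','0'] then some 'v' else (if s = ['1','1','1','1','1','0','1'] then some 'k' else (if s = ['1','1','1','1','1','0','0'] then some 'b' else (if s = ['1','1','1','1','0','1'] then some '.' else (if s = ['1','1','1','1','0','0'] then some 'p' else (if s = ['1','1','1','0','1','1'] then some 'y' else (if s = ['1','1','1','0','1','0'] then some 'g' else (if s = ['1','1','1','0','0','1'] then some 'c' else (if s = ['1','1','1','0','0','0'] then some 'f' else (if s = ['1','1','0','1','1','1'] then some 'm' else (if s = ['1','1','0','1','1','0'] then some 'w' else (if s = ['1','1','0','1','0'] then some 'u' else (if s = ['1','1','0','0','1'] then some 'l' else (if s = ['1','1','0','0','0'] then some 'd' else (if s = ['1','0','1','1','1'] then some 'h' else (if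 s = ['1','0','1','1','0'] then some 's' else (if s = ['1','0','1','0'] then some 'n' else (if s = ['1','0','0','1'] then some 'o' else (if s = ['1','0','0','0'] then some 'i' else (if s = ['0','1','1','1'] then some 'r' else (if s = ['0','1','1','0'] then some 'a' else (if s = ['0','1','0','1'] then some 't' else (if s = ['0','1','0','0'] then some 'e' else (if s = ['0','0'] then some ' ' else (pvWalk PvTrie.nil s).val)))))))))))))))))))))))))))) := by
    rw [pvRoot_eq]
    simp only [pvCodes, List.foldl_cons, List.foldl_nil]
    rw [pvWalk_insert ['1','1','1','1','1','1','1','1','1'] (by intro c hc; fin_cases hc <;> simp)]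
    rw [pvWalk_insert ['1','1','1','1','1','1','1','1','0'] (by intro c hc; fin_cases hc <;> simp)]
    rw [pvWalk_insert ['1','1','1','1','1','1','1','0'] (by intro c hc; fin_cases hc <;> simp)]
    rw [pvWalk_insert ['1','1','1','1','1','1','0','1'] (by intro c hc; fin_cases hc <;> simp)]
    rw [pvWalk_insert ['1','1','1','1','1','1','0','0'] (by intro c hc; fin_cases hc <;> simp)]
    rw [pvWalk_insert ['1','1','1','1','1','0','1'] (by intro c hc; fin_cases hc <;> simp)]
    rw [pvWalk_insert ['1','1','1','1','1','0','0'] (by intro c hc; fin_cases hc <;> simp)]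
    rw [pvWalk_insert ['1','1','1','1','0','1'] (by intro c hc; fin_cases hc <;> simp)]
    rw [pvWalk_insert ['1','1','1','1','0','0'] (by intro c hc; fin_cases hc <;> simp)]
    rw [pvWalk_insert ['1','1','1','0','1','1'] (by intro c hc; fin_cases hc <;> simp)]
    rw [pvWalk_insert ['1','1','1','0','1','0'] (by intro c hc; fin_cases hc <;> simp)]
    rw [pvWalk_insert ['1','1','1','0','0','1'] (by intro c hc; fin_cases hc <;> simp)]
    rw [pvWalk_insert ['1','1','1','0','0','0'] (by intro c hc; fin_cases hc <;> simp)]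
    rw [pvWalk_insert ['1','1','0','1','1','1'] (by intro c hc; fin_cases hc <;> simp)]
    rw [pvWalk_insert ['1','1','0','1','1','0'] (by intro c hc; fin_cases hc <;> simp)]
    rw [pvWalk_insert ['1','1','0','1','0'] (by intro c hc; fin_cases hc <;> simp)]
    rw [pvWalk_insert ['1','1','0','0','1'] (by intro c hc; fin_cases hc <;> simp)]
    rw [pvWalk_insert ['1','1','0','0','0'] (by intro c hc; fin_cases hc <;> simp)]
    rw [pvWalk_insert ['1','0','1','1','1'] (by intro c hc; fin_cases hc <;> simp)]
    rw [pvWalk_insert ['1','0','1','1','0'] (by intro c hc; fin_cases hc <;> simp)]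
    rw [pvWalk_insert ['1','0','1','0'] (by intro c hc; fin_cases hc <;> simp)]
    rw [pvWalk_insert ['1','0','0','1'] (by intro c hc; fin_cases hc <;> simp)]
    rw [pvWalk_insert ['1','0','0','0'] (by intro c hc; fin_cases hc <;> simp)]
    rw [pvWalk_insert ['0','1','1','1'] (by intro c hc; fin_cases hc <;> simp)]
    rw [pvWalk_insert ['0','1','1','0'] (by intro c hc; fin_cases hc <;> simp)]
    rw [pvWalk_insert ['0','1','0','1'] (by intro c hc; fin_cases hc <;> simp)]
    rw [pvWalk_insert ['0','1','0','0'] (by intro c hc; fin_cases hc <;> simp)]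
    rw [pvWalk_insert ['0','0'] (by intro c hc; fin_cases hc <;> simp)]
  rw [hroot, pvWalk_nil]
  by_cases hs : s ∈ pvCodes.map Prod.fst
  · simp only [pvCodes, List.map_cons, List.map_nil, List.mem_cons, List.not_mem_nil, or_false] at hs
    rcases hs with h|h|h|h|h|h|h|h|h|h|h|h|h|h|h|h|h|h|h|h|h|h|h|h|h|h|h|h <;> subst h <;> decide
  · simp only [pvCodes, List.map_cons, List.map_nil, List.mem_cons, List.not_mem_nil, or_false, not_or] at hs
    obtain ⟨h0,h1,h2,h3,h4,h5,h6,h7,h8,h9,h10,h11,h12,h13,h14,h15,h16,h17,h18,h19,h20,h21,h22,h23,h24,h25,h26,h27⟩ := hs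
    simp [PySem.Dict.get?_mk_cons, pvCodes, beq_iff_eq, h0, h1, h2, h3, h4, h5, h6, h7, h8, h9, h10, h11, h12, h13, h14, h15, h16, h17, h18, h19, h20, h21, h22, h23, h24, h25, h26, h27, Ne.symm h0, Ne.symm h1, Ne.symm h2, Ne.symm h3, Ne.symm h4, Ne.symm h5, Ne.symm h6, Ne.symm h7, Ne.symm h8, Ne.symm h9, Ne.symm h10, Ne.symm h11, Ne.symm h12, Ne.symm h13, Ne.symm h14, Ne.symm h15, Ne.symm h16, Ne.symm h17, Ne.symm h18, Ne.symm h19, Ne.symm h20, Ne.symm h21, Ne.symm h22, Ne.symm h23, Ne.symm h24, Ne.symm h25, Ne.symm h26, Ne.symm h27]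
    rfl

theorem pvCharDict_eq : pvCharDict = PySem.Dict.mk pvCodes := by decide

theorem pvWalk_snoc (t : PvTrie) (w : List Char) (c : Char) :
    pvWalk t (w ++ [c]) = (pvWalk t w).step c := by
  simp [pvWalk]

theorem pvSlice_snoc (l : List Char) (p k : Nat) (hp : p ≤ k) (hk : k < l.length) :
    PySem.List.slice l (some (p : Int)) (some ((k : Int) + 1)) =
      PySem.List.slice l (some (p : Int)) (some (k : Int)) ++ [l[k]] := by
  have h1 : ((k : Int) + 1) = ((k + 1 : Nat) : Int) := by push_cast; ring
  rw [h1, PySem.List.slice_natCast, PySem.List.slice_natCast]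
  have h2 : k + 1 - p = (k - p) + 1 := by omega
  rw [h2, List.take_add_one]
  congr 1
  rw [List.getElem?_drop]
  have h4 : p + (k - p) = k := by omega
  rw [h4, List.getElem?_eq_getElem hk]
  rfl

-- ---- A's decode loop produces B's decode ----

theorem pvLoop_eq (l : List Char) (m : Nat) :
    ∀ (k p : Nat) (out : List Char), m = l.length - k → k ≤ l.length → p ≤ k →
    ((PySem.List.pyRange ((k : Int) + 1) ((l.length : Int) + 1) 1).foldl
        (fun (st : Int × List Char) x =>
          match (pvCharDict.get? (PySem.List.slice l (some st.1) (some x))) with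
          | some c => (x, st.2 ++ [c])
          | none => st) ((p : Int), out)).2
    = out ++ pvDecode (pvWalk pvRoot (PySem.List.slice l (some (p : Int)) (some (k : Int)))) (l.drop k) := by
  induction m with
  | zero =>
      intro k p out hm hk hp
      have hkn : k = l.length := by omega
      subst hkn
      rw [PySem.List.pyRange_one_eq_nil (by omega), List.drop_length]
      simp [pvDecode]
  | succ m ih =>
      intro k p out hm hk hp
      have hkn : k < l.length := by omega
      rw [PySem.List.pyRange_one_cons (by omega)]
      rw [List.drop_eq_getElem_cons hkn]
      simp only [List.foldl_cons]
      rw [pvCharDict_eq, pvLookup_eq_walk, pvSlice_snoc l p k hp hkn, pvWalk_snoc]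
      cases hv : ((pvWalk pvRoot (PySem.List.slice l (some (p:Int)) (some (k:Int)))).step l[k]).val with
      | some c =>
          have h1 : ((k : Int) + 1) = ((k + 1 : Nat) : Int) := by push_cast; ring
          have := ih (k+1) (k+1) (out ++ [c]) (by omega) (by omega) (le_refl _)
          rw [h1, ← pvCharDict_eq, this]
          have hsl : PySem.List.slice l (some ((k+1 : Nat) : Int)) (some ((k+1 : Nat) : Int)) = ([] : List Char) := by
            rw [PySem.List.slice_natCast]; simp
          rw [hsl]
          simp only [pvDecode, hv]
          simp [pvWalk]
      | none =>
          have h1 : ((k : Int) + 1) = ((k + 1 : Nat) : Int) := by push_cast; ring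
          have := ih (k+1) p out (by omega) (by omega) (by omega)
          rw [h1, ← pvCharDict_eq, this]
          rw [← h1, pvSlice_snoc l p k hp hkn, pvWalk_snoc]
          simp only [pvDecode, hv]

-- ---- A's capitalization loop produces B's sliding-window capitalization ----

def pvCapA : Int → List Char → List Char
  | _, [] => []
  | k, c :: cs =>
      (if k = 1 then PySem.Chars.upperChar c else c)
        :: pvCapA (if c = '.' then 2 else if k > 0 then k - 1 else k) cs

theorem pvCapA_foldl (rest : List Char) :
    ∀ (acc : List Char) (k : Int),
    (rest.foldl
      (fun (st : List Char × Int) rChar =>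
        (st.1 ++ [if st.2 = 1 then PySem.Chars.upperChar rChar else rChar],
         if rChar = '.' then 2 else if st.2 > 0 then st.2 - 1 else st.2))
      (acc, k)).1 = acc ++ pvCapA k rest := by
  induction rest with
  | nil => intro acc k; simp [pvCapA]
  | cons c cs ih =>
      intro acc k
      simp only [List.foldl_cons, pvCapA]
      rw [ih]
      simp

-- the counter k is a function of the last two characters
def pvKOf (p2 p1 : Option Char) : Int :=
  if p1 = none ∨ (p2 = some '.' ∧ p1 ≠ some '.') then 1
  else if p1 = some '.' then 2 else 0

theorem pvCapA_eq_capB (rest : List Char) :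
    ∀ (p2 p1 : Option Char), pvCapA (pvKOf p2 p1) rest = pvCapB p2 p1 rest := by
  induction rest with
  | nil => intro p2 p1; rfl
  | cons c cs ih =>
      intro p2 p1
      simp only [pvCapA, pvCapB]
      congr 1
      · -- heads agree: k = 1 iff the window condition holds
        unfold pvKOf
        split_ifs with h1 h2 h3 <;> simp_all
      · -- tails agree: the updated counter is pvKOf of the shifted window
        rw [← ih p1 (some c)]
        congr 1
        unfold pvKOf
        by_cases hc : c = '.'
        · subst hc
          split_ifs <;> simp_all
        · split_ifs <;> simp_all

-- ===== VERDICT (by name: the statement is the Claim_ definition above) =====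
theorem numToTxt_spec : Claim_equal_numToTxt := by
  intro bi _
  simp only [Spec_numToTxt, numToTxt, numToTxt_alt]
  apply congrArg
  have h0 : (0 : Int) < (bi.toList.length : Int) + 1 := by positivity
  rw [PySem.List.pyRange_one_cons h0, List.foldl_cons]
  have hsl : PySem.List.slice bi.toList (some (0 : Int)) (some (0 : Int)) = ([] : List Char) := by
    simpa using PySem.List.slice_natCast bi.toList 0 0
  have hget : pvCharDict.get? ([] : List Char) = none := by rw [pvCharDict_eq]; rfl
  simp only [hsl, hget]
  have hloop := pvLoop_eq bi.toList bi.toList.length 0 0 [] (by omega) (by omega) (by omega)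
  simp only [Nat.cast_zero, zero_add] at hloop
  rw [show ((0:Int)+1) = (1:Int) from by norm_num, hloop, hsl, List.drop_zero, List.nil_append, pvCapA_foldl, List.nil_append]
  rw [show (1:Int) = pvKOf none none from rfl, pvCapA_eq_capB]
  rfl
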